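-- pv_equiv track=rewrite | github.com/DryHop2/aoc-2025 | day08.py | part1
-- ===== SOURCE A (Python) =====
-- import heapq
-- from math import prod
--
-- def parse(text: str):
--     points = []
--     for line in text.strip().splitlines():
--         x, y, z = map(int, line.split(","))
--         points.append((x, y, z))
--     return points
--
-- def part1(text: str, num_pairs: int = 1000):
--     points = parse(text)
--     n = len(points)
--
--
--     def gen_edges():
--         for i in range(n):
--             x1, y1, z1 = points[i]
--             for j in range(i + 1, n):
--                 x2, y2, z2 = points[j]
--                 dx = x1 - x2
--                 dy = y1 - y2
--                 dz = z1 - z2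
--                 dist2 = dx*dx + dy*dy + dz*dz
--                 yield (dist2, i, j)
--
--
--     edges = heapq.nsmallest(num_pairs, gen_edges(), key=lambda e: e[0])
--
--     parent = list(range(n))
--     size = [1] * n
--
--
--     def find(x):
--         while parent[x] != x:
--             parent[x] = parent[parent[x]]
--             x = parent[x]
--
--         return x
--
--
--     def union(a, b):
--         ra = find(a)
--         rb = find(b)
--         if ra == rb:
--             return
--         if size[ra] < size[rb]:
--             ra, rb = rb, ra
--         parent[rb] = ra
--         size[ra] += size[rb]
--
--
--     for _, i, j in edges:
--         union(i, j)
--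
--     comps = {}
--     for i in range(n):
--         root = find(i)
--         comps[root] = comps.get(root, 0) + 1
--
--     sizes = sorted(comps.values(), reverse=True)
--
--     return prod(sizes[:3])
-- ===== SOURCE B (Python) =====
-- import heapq
-- from math import prod
--
--
-- def part1(text: str, num_pairs: int = 1000):
--     points = [(int(x), int(y), int(z))
--               for x, y, z in (line.split(",") for line in text.strip().splitlines())]
--     n = len(points)
--
--     edges = heapq.nsmallest(
--         num_pairs,
--         (((p[0] - q[0]) ** 2 + (p[1] - q[1]) ** 2 + (p[2] - q[2]) ** 2, i, j)
--          for i, p in enumerate(points) for j, q in enumerate(points) if i < j),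
--         key=lambda e: e[0],
--     )
--
--     # flat label array instead of a union-find forest: merging two components
--     # rewrites every label of one class to the other's label
--     labels = list(range(n))
--     for _, i, j in edges:
--         li, lj = labels[i], labels[j]
--         if li != lj:
--             labels = [li if l == lj else l for l in labels]
--
--     counts = {}
--     for l in labels:
--         counts[l] = counts.get(l, 0) + 1
--
--     sizes = sorted(counts.values(), reverse=True)
--     return prod(sizes[:3])
-- ===== Notes on version B (the rewrite author's own statement) =====
-- stated objective: simpler
-- what changed: The union-find forest (path compression, union by size) is replaced by a flat label array: each selected edge merges two components by rewriting one component's label over the whole array, and component sizes are read off by counting labels; parse and nsmallest edge selection are unchanged so the same edge set is used.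
import Mathlib
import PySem

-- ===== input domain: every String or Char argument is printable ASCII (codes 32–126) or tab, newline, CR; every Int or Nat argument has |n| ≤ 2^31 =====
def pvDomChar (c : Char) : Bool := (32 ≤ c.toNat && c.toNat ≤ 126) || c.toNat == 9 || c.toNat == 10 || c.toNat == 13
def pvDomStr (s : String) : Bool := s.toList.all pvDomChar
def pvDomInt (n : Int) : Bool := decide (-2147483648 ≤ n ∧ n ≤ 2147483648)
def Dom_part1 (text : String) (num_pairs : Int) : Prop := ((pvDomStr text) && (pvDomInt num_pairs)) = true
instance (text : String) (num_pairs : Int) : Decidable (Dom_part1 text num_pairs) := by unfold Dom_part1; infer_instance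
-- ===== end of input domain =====

-- B replaces A's union-find forest with a flat label array flooded per selected edge (objective: simpler); same parse and nsmallest edge selection.

-- ===== PORT A =====
-- shared by both ports: the parse() helper (identical source in Source A and Source B);
-- none = the line does not split into exactly 3 int()-parsable fields (Python ValueError)
def pvParseLine? (l : List Char) : Option (Int × Int × Int) :=
  match (PySem.Chars.splitOn l [',']).mapM PySem.Int.ofChars? with
  | some [x, y, z] => some (x, y, z)
  | _ => none

def pvParse? (text : String) : Option (List (Int × Int × Int)) :=
  (PySem.Chars.splitlines (PySem.Chars.strip text.toList)).mapM pvParseLine?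

-- shared by both ports: heapq.nsmallest(k, es, key=e[0]), ported by its documented
-- contract sorted(es, key=...)[:k] (empty for k ≤ 0) — both Pythons make this exact library call
def pvNSmallest (k : Int) (es : List (Int × Nat × Nat)) : List (Int × Nat × Nat) :=
  if k ≤ 0 then [] else (PySem.List.sorted es (fun e => e.1)).take k.toNat

-- A's gen_edges(): i in range(n), j in range(i+1, n)
def pvEdges (pts : List (Int × Int × Int)) : List (Int × Nat × Nat) :=
  (List.range pts.length).flatMap (fun i =>
    (List.range' (i + 1) (pts.length - (i + 1))).map (fun j =>
      let p := pts.getD i (0, 0, 0)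
      let q := pts.getD j (0, 0, 0)
      let dx := p.1 - q.1
      let dy := p.2.1 - q.2.1
      let dz := p.2.2 - q.2.2
      (dx * dx + dy * dy + dz * dz, i, j)))

-- A's find(): while parent[x] != x: parent[x] = parent[parent[x]]; x = parent[x]
-- (fuel-bounded loop; fuel = len(parent) suffices on every state the program reaches)
def pvFindGo : Nat → List Nat → Nat → List Nat × Nat
  | 0, p, x => (p, x)
  | f + 1, p, x =>
      let px := p.getD x 0
      if px = x then (p, x)
      else
        let gp := p.getD px 0
        pvFindGo f (p.set x gp) gp

def pvFindA (p : List Nat) (x : Nat) : List Nat × Nat := pvFindGo p.length p x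

-- A's union(a, b) acting on the (parent, size) state
def pvUnionA (st : List Nat × List Int) (a b : Nat) : List Nat × List Int :=
  let f1 := pvFindA st.1 a
  let f2 := pvFindA f1.1 b
  if f2.2 = f1.2 then (f2.1, st.2)
  else
    let rr := if st.2.getD f1.2 0 < st.2.getD f2.2 0 then (f2.2, f1.2) else (f1.2, f2.2)
    (f2.1.set rr.2 rr.1, st.2.set rr.1 (st.2.getD rr.1 0 + st.2.getD rr.2 0))

def pvCountA (n : Nat) (p0 : List Nat) : List Nat × PySem.Dict Nat Int :=
  (List.range n).foldl (fun pd i =>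
    let fr := pvFindA pd.1 i
    (fr.1, pd.2.insert fr.2 (pd.2.getD fr.2 0 + 1))) (p0, PySem.Dict.empty)

def pvPart1Core (pts : List (Int × Int × Int)) (num_pairs : Int) : Int :=
  let n := pts.length
  let edges := pvNSmallest num_pairs (pvEdges pts)
  let st := edges.foldl (fun st e => pvUnionA st e.2.1 e.2.2) (List.range n, List.replicate n (1 : Int))
  let comps := (pvCountA n st.1).2
  let sizes := PySem.List.sorted comps.values (fun v => v) true
  (sizes.take 3).foldl (· * ·) 1

def part1 (text : String) (num_pairs : Int) : Int :=
  match pvParse? text with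
  | some pts => pvPart1Core pts num_pairs
  | none => 0        -- Python raises ValueError here; excluded by Pre_part1

-- ===== PORT B =====
-- Source B's edge comprehension: enumerate × enumerate filtered by i < j
def pvEdgesB (pts : List (Int × Int × Int)) : List (Int × Nat × Nat) :=
  pts.zipIdx.flatMap (fun pi =>
    pts.zipIdx.flatMap (fun qj =>
      if pi.2 < qj.2 then
        [((pi.1.1 - qj.1.1) ^ 2 + (pi.1.2.1 - qj.1.2.1) ^ 2 + (pi.1.2.2 - qj.1.2.2) ^ 2, pi.2, qj.2)]
      else []))

-- Source B's merge loop: rewrite every label lj to li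
def pvLabStep (lab : List Nat) (i j : Nat) : List Nat :=
  let li := lab.getD i 0
  let lj := lab.getD j 0
  if li = lj then lab else lab.map (fun l => if l = lj then li else l)

def pvPart1AltCore (pts : List (Int × Int × Int)) (num_pairs : Int) : Int :=
  let n := pts.length
  let edges := pvNSmallest num_pairs (pvEdgesB pts)
  let labels := edges.foldl (fun lab e => pvLabStep lab e.2.1 e.2.2) (List.range n)
  let counts := labels.foldl (fun d l => d.insert l (d.getD l 0 + 1)) PySem.Dict.empty
  let sizes := PySem.List.sorted counts.values (fun v => v) true
  (sizes.take 3).foldl (· * ·) 1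

def part1_alt (text : String) (num_pairs : Int) : Int :=
  match pvParse? text with
  | some pts => pvPart1AltCore pts num_pairs
  | none => 0

-- ===== PRECONDITION & SPEC =====
-- Pre_ excludes exactly the inputs where A's parse raises ValueError: a line of text.strip()
-- that does not consist of exactly 3 comma-separated int()-parsable fields.
def Pre_part1 (text : String) (num_pairs : Int) : Prop :=
  ((PySem.Chars.splitlines (PySem.Chars.strip text.toList)).all (fun l =>
    (PySem.Chars.splitOn l [',']).length == 3 &&
    (PySem.Chars.splitOn l [',']).all (fun s => (PySem.Int.ofChars? s).isSome))) = true

instance (text : String) (num_pairs : Int) : Decidable (Pre_part1 text num_pairs) := by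
  unfold Pre_part1; infer_instance

def pvWitness_part1 : String × Int := ("6,0,0\n0,0,0\n1,0,0\n9,9,9", 2)

def Spec_part1 (text : String) (num_pairs : Int) (out : Int) : Prop := out = part1_alt text num_pairs
instance (text : String) (num_pairs : Int) (out : Int) : Decidable (Spec_part1 text num_pairs out) := by
  unfold Spec_part1; infer_instance

-- ===== CLAIM (what is proved, stated in full; the proofs are below) =====
def Claim_equal_part1 : Prop := ∀ (text : String) (num_pairs : Int), Dom_part1 text num_pairs → Pre_part1 text num_pairs → Spec_part1 text num_pairs (part1 text num_pairs)

-- ===== LEMMAS AND PROOFS =====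

def pvStp (p : List Nat) (x : Nat) : Nat := p.getD x 0

def pvReaches (p : List Nat) (x r : Nat) : Prop := ∃ k, (pvStp p)^[k] x = r ∧ pvStp p r = r

def pvValid (n : Nat) (p : List Nat) : Prop := p.length = n ∧ ∀ x, x < n → pvStp p x < n

theorem pvStp_set {p : List Nat} {a : Nat} (ha : a < p.length) (v y : Nat) :
    pvStp (p.set a v) y = if y = a then v else pvStp p y := by
  unfold pvStp
  rcases eq_or_ne y a with rfl | hne
  · simp [List.getD, ha]
  · simp [List.getD, List.getElem?_set_ne (Ne.symm hne), hne]

theorem pvReaches_det {p : List Nat} {x r r' : Nat}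
    (h : pvReaches p x r) (h' : pvReaches p x r') : r = r' := by
  obtain ⟨k, hk, hr⟩ := h; obtain ⟨k', hk', hr'⟩ := h'
  rcases le_total k k' with hle | hle
  · have h2 : (pvStp p)^[k' - k + k] x = r' := by rw [Nat.sub_add_cancel hle]; exact hk'
    rw [Function.iterate_add_apply, hk, Function.iterate_fixed hr] at h2; exact h2
  · have h2 : (pvStp p)^[k - k' + k'] x = r := by rw [Nat.sub_add_cancel hle]; exact hk
    rw [Function.iterate_add_apply, hk', Function.iterate_fixed hr'] at h2; exact h2.symm

theorem pvIter_lt {n : Nat} {p : List Nat} (hv : pvValid n p) {x : Nat} (hx : x < n) (k : Nat) :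
    (pvStp p)^[k] x < n := by
  induction k with
  | zero => simpa using hx
  | succ k ih => rw [Function.iterate_succ_apply']; exact hv.2 _ ih

theorem pvChain_le {n : Nat} {p : List Nat} (hv : pvValid n p) {x r : Nat} (hx : x < n)
    (h : pvReaches p x r) : ∃ k ≤ n, (pvStp p)^[k] x = r := by
  obtain ⟨k, hk, hr⟩ := h
  have hex : ∃ m, (pvStp p)^[m] x = r := ⟨k, hk⟩
  classical
  set k0 := Nat.find hex with hk0
  refine ⟨k0, ?_, Nat.find_spec hex⟩
  have hinj : Set.InjOn (fun i => (pvStp p)^[i] x) (Finset.range k0) := by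
    intro i hi j hj hij'
    simp only [] at hij'
    have hij : (pvStp p)^[i] x = (pvStp p)^[j] x := hij'
    simp only [Finset.coe_range, Set.mem_Iio] at hi hj
    by_contra hne
    rcases Nat.lt_or_ge i j with hlt | hge
    · have : (pvStp p)^[k0 - j + i] x = r := by
        have := Nat.find_spec hex
        calc (pvStp p)^[k0 - j + i] x = (pvStp p)^[k0 - j] ((pvStp p)^[i] x) := by
              rw [Function.iterate_add_apply]
          _ = (pvStp p)^[k0 - j] ((pvStp p)^[j] x) := by rw [hij]
          _ = (pvStp p)^[k0 - j + j] x := by rw [Function.iterate_add_apply]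
          _ = r := by rw [Nat.sub_add_cancel (le_of_lt hj)]; exact this
      exact absurd this (Nat.find_min hex (by omega))
    · have hlt : j < i := by omega
      have : (pvStp p)^[k0 - i + j] x = r := by
        have := Nat.find_spec hex
        calc (pvStp p)^[k0 - i + j] x = (pvStp p)^[k0 - i] ((pvStp p)^[j] x) := by
              rw [Function.iterate_add_apply]
          _ = (pvStp p)^[k0 - i] ((pvStp p)^[i] x) := by rw [hij]
          _ = (pvStp p)^[k0 - i + i] x := by rw [Function.iterate_add_apply]
          _ = r := by rw [Nat.sub_add_cancel (le_of_lt hi)]; exact this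
      exact absurd this (Nat.find_min hex (by omega))
  have hmap : ∀ i ∈ Finset.range k0, (pvStp p)^[i] x ∈ Finset.range n := by
    intro i _; simpa using pvIter_lt hv hx i
  have := Finset.card_le_card_of_injOn _ hmap hinj
  simpa using this

theorem pvCompress_sim {p : List Nat} {x : Nat} (hx : x < p.length)
    (hpx : pvStp p x ≠ x) :
    ∀ m y r, (pvStp p)^[m] y = r → pvStp p r = r →
      ∃ m' ≤ m, (pvStp (p.set x (pvStp p (pvStp p x))))^[m'] y = r ∧
        pvStp (p.set x (pvStp p (pvStp p x))) r = r := by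
  set p' := p.set x (pvStp p (pvStp p x)) with hp'
  have hstp : ∀ y, pvStp p' y = if y = x then pvStp p (pvStp p x) else pvStp p y :=
    fun y => pvStp_set hx _ y
  intro m
  induction m using Nat.strong_induction_on with
  | _ m ih =>
    intro y r hchain hfix
    have hrx : r ≠ x := fun h => hpx (by rw [← h]; exact hfix)
    have hfix' : pvStp p' r = r := by rw [hstp, if_neg hrx]; exact hfix
    match m, hchain with
    | 0, hchain => exact ⟨0, le_refl _, hchain, hfix'⟩
    | m₀+1, hchain =>
      rw [Function.iterate_succ_apply] at hchain
      by_cases hy : y = x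
      · subst hy
        match m₀, hchain with
        | 0, hchain =>
          -- p x = r, so p' x = p (p x) = p r = r
          simp only [Function.iterate_zero_apply] at hchain
          refine ⟨1, by omega, ?_, hfix'⟩
          rw [Function.iterate_one, hstp, if_pos rfl, hchain, hfix]
        | m₁+1, hchain =>
          rw [Function.iterate_succ_apply] at hchain
          obtain ⟨m', hm', hc', _⟩ := ih m₁ (by omega) _ _ hchain hfix
          refine ⟨m' + 1, by omega, ?_, hfix'⟩
          rw [Function.iterate_succ_apply, hstp, if_pos rfl]; exact hc'
      · obtain ⟨m', hm', hc', _⟩ := ih m₀ (by omega) _ _ hchain hfix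
        refine ⟨m' + 1, by omega, ?_, hfix'⟩
        rw [Function.iterate_succ_apply, hstp, if_neg hy]; exact hc'

theorem pvCompress_sim_back {p : List Nat} {x rx : Nat} (hx : x < p.length)
    (hpx : pvStp p x ≠ x) (hgr : pvReaches p x rx) :
    ∀ m y r', (pvStp (p.set x (pvStp p (pvStp p x))))^[m] y = r' →
      pvStp ((p.set x (pvStp p (pvStp p x)))) r' = r' → pvReaches p y r' := by
  set p' := p.set x (pvStp p (pvStp p x)) with hp'
  have hstp : ∀ y, pvStp p' y = if y = x then pvStp p (pvStp p x) else pvStp p y :=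
    fun y => pvStp_set hx _ y
  -- x is not a fixpoint of p' (else x's p-chain cycles between x and p x, never reaching rx)
  have hxnf : pvStp p' x ≠ x := by
    rw [hstp, if_pos rfl]
    intro hcyc   -- p (p x) = x
    obtain ⟨k, hk, hr⟩ := hgr
    have hper : ∀ k, (pvStp p)^[k] x = x ∨ (pvStp p)^[k] x = pvStp p x := by
      intro k
      induction k with
      | zero => left; rfl
      | succ k ih =>
        rw [Function.iterate_succ_apply']
        rcases ih with h | h
        · right; rw [h]
        · left; rw [h]; exact hcyc
    rcases hper k with h | h
    · rw [hk] at h; subst h; exact hpx hr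
    · rw [hk] at h
      rw [h] at hr
      rw [hcyc] at hr
      exact hpx hr.symm
  intro m
  induction m with
  | zero =>
    intro y r' hc hf
    simp only [Function.iterate_zero_apply] at hc
    subst hc
    have hry : y ≠ x := fun h => hxnf (h ▸ hf)
    refine ⟨0, rfl, ?_⟩
    have hs := hstp y
    rw [if_neg hry] at hs
    rw [hs] at hf; exact hf
  | succ m ih =>
    intro y r' hc hf
    rw [Function.iterate_succ_apply] at hc
    obtain ⟨k, hk, hfr⟩ := ih _ _ hc hf
    by_cases hy : y = x
    · subst hy
      have hs : pvStp p' y = pvStp p (pvStp p y) := by rw [hstp, if_pos rfl]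
      rw [hs] at hk
      exact ⟨k + 2, by rw [Function.iterate_add_apply]; simpa [Function.iterate_succ_apply] using hk, hfr⟩
    · have hs : pvStp p' y = pvStp p y := by rw [hstp, if_neg hy]
      rw [hs] at hk
      exact ⟨k + 1, by rw [Function.iterate_succ_apply]; exact hk, hfr⟩

def pvGrounded (n : Nat) (p : List Nat) : Prop := ∀ x, x < n → ∃ r, pvReaches p x r

theorem pvFindGo_spec {n : Nat} : ∀ (f : Nat) (p : List Nat) (x r k : Nat),
    pvValid n p → x < n → (pvStp p)^[k] x = r → pvStp p r = r → k ≤ f →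
    (pvFindGo f p x).2 = r ∧ pvValid n (pvFindGo f p x).1 ∧
      (∀ y s, pvReaches (pvFindGo f p x).1 y s ↔ pvReaches p y s) := by
  intro f
  induction f with
  | zero =>
    intro p x r k hv hx hc hfix hk
    interval_cases k
    simp only [Function.iterate_zero_apply] at hc
    exact ⟨hc, hv, fun y s => Iff.rfl⟩
  | succ f ih =>
    intro p x r k hv hx hc hfix hk
    by_cases hpx : p.getD x 0 = x
    · -- x is its own parent: returns immediately, and r = x
      have hfx : pvStp p x = x := hpx
      have hxr : r = x := by rw [← hc, Function.iterate_fixed hfx]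
      simp only [pvFindGo, hpx]
      exact ⟨hxr.symm, hv, fun y s => Iff.rfl⟩
    · have hxlen : x < p.length := by rw [hv.1]; exact hx
      have hne : pvStp p x ≠ x := hpx
      have hgo : pvFindGo (f + 1) p x
          = pvFindGo f (p.set x (pvStp p (pvStp p x))) (pvStp p (pvStp p x)) := by
        simp only [pvFindGo, hpx]
        rfl
      set p' := p.set x (pvStp p (pvStp p x)) with hp'
      have hstp : ∀ y, pvStp p' y = if y = x then pvStp p (pvStp p x) else pvStp p y :=
        fun y => pvStp_set hxlen (pvStp p (pvStp p x)) y
      -- validity of p'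
      have hv' : pvValid n p' := by
        constructor
        · rw [hp', List.length_set, hv.1]
        · intro y hy
          rw [hstp y]
          split
          · exact pvIter_lt hv hx 2
          · exact hv.2 y hy
      -- k ≥ 1 (x is not a fixpoint)
      have hk1 : 1 ≤ k := by
        rcases Nat.eq_zero_or_pos k with h | h
        · subst h; simp only [Function.iterate_zero_apply] at hc; subst hc
          exact absurd hfix hne
        · exact h
      have hgr : pvReaches p x r := ⟨k, hc, hfix⟩
      have hrneqx : r ≠ x := fun h => hne (h ▸ hfix)
      have hfix' : pvStp p' r = r := by rw [hstp, if_neg hrneqx]; exact hfix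
      -- a chain from gp := p(p x) to r in p', of length ≤ f
      have hchain' : ∃ k' ≤ f, (pvStp p')^[k'] (pvStp p (pvStp p x)) = r := by
        rcases Nat.lt_or_ge k 2 with h2 | h2
        · -- k = 1 : p x = r, gp = p r = r
          have hk' : k = 1 := by omega
          subst hk'
          simp only [Function.iterate_one] at hc
          refine ⟨0, Nat.zero_le _, ?_⟩
          simp only [Function.iterate_zero_apply, hc, hfix]
        · have hc2 : (pvStp p)^[k - 2] (pvStp p (pvStp p x)) = r := by
            have : (pvStp p)^[k - 2 + 2] x = r := by
              rw [Nat.sub_add_cancel h2]; exact hc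
            rw [Function.iterate_add_apply] at this
            simpa [Function.iterate_succ_apply] using this
          obtain ⟨m', hm', hcm, _⟩ := pvCompress_sim hxlen hne (k - 2) _ _ hc2 hfix
          exact ⟨m', by omega, hcm⟩
      obtain ⟨k', hk', hck⟩ := hchain'
      have hgpn : pvStp p (pvStp p x) < n := pvIter_lt hv hx 2
      obtain ⟨h1, h2, h3⟩ := ih p' (pvStp p (pvStp p x)) r k' hv' hgpn hck hfix' hk'
      refine ⟨by rw [hgo]; exact h1, by rw [hgo]; exact h2, ?_⟩
      intro y s
      rw [hgo]
      rw [h3 y s]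
      constructor
      · intro hre
        obtain ⟨m, hm, hf⟩ := hre
        exact pvCompress_sim_back hxlen hne hgr m y s hm hf
      · intro hre
        obtain ⟨m, hm, hf⟩ := hre
        obtain ⟨m', _, hc', hf'⟩ := pvCompress_sim hxlen hne m y s hm hf
        exact ⟨m', hc', hf'⟩

theorem pvFindA_spec {n : Nat} {p : List Nat} {x r : Nat}
    (hv : pvValid n p) (hx : x < n) (hr : pvReaches p x r) :
    (pvFindA p x).2 = r ∧ pvValid n (pvFindA p x).1 ∧
      (∀ y s, pvReaches (pvFindA p x).1 y s ↔ pvReaches p y s) := by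
  obtain ⟨k, hkn, hc⟩ := pvChain_le hv hx hr
  have hfix := hr.choose_spec
  obtain ⟨k0, hc0, hfix0⟩ := hr
  exact pvFindGo_spec p.length p x r k hv hx hc (by
    have : r = r := rfl
    -- fixpoint of r from hr
    exact hfix0) (by rw [hv.1]; exact hkn)

theorem pvReaches_fix {p : List Nat} {x r : Nat} (h : pvReaches p x r) : pvStp p r = r := by
  obtain ⟨k, _, hf⟩ := h; exact hf

theorem pvReaches_lt {n : Nat} {p : List Nat} {x r : Nat}
    (hv : pvValid n p) (hx : x < n) (h : pvReaches p x r) : r < n := by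
  obtain ⟨k, hk, _⟩ := h; rw [← hk]; exact pvIter_lt hv hx k

theorem pvReaches_step {p : List Nat} {y z r : Nat} (hz : pvStp p y = z)
    (h : pvReaches p z r) : pvReaches p y r := by
  obtain ⟨m, hm, hf⟩ := h
  exact ⟨m + 1, by rw [Function.iterate_succ_apply, hz]; exact hm, hf⟩

def pvSameRoot (p : List Nat) (x y : Nat) : Prop := ∃ r, pvReaches p x r ∧ pvReaches p y r

theorem pvSameRoot_iff {p : List Nat} {x y rx ry : Nat}
    (hx : pvReaches p x rx) (hy : pvReaches p y ry) : pvSameRoot p x y ↔ rx = ry := by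
  constructor
  · rintro ⟨r, h1, h2⟩
    rw [← pvReaches_det h1 hx, ← pvReaches_det h2 hy]
  · intro h; exact ⟨rx, hx, h ▸ hy⟩

theorem pvCollapse {a b u v : Nat} (_hab : a ≠ b) :
    ((if u = b then a else u) = (if v = b then a else v)) ↔
      (u = v ∨ ((u = a ∨ u = b) ∧ (v = a ∨ v = b))) := by
  split_ifs <;> omega

theorem pvGetD_map (f : Nat → Nat) (l : List Nat) {i : Nat} (hi : i < l.length) :
    (l.map f).getD i 0 = f (l.getD i 0) := by
  rw [List.getD_eq_getElem l 0 hi, List.getD_eq_getElem _ 0 (by simpa using hi)]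
  simp

theorem pvMerge_reaches {n : Nat} {p : List Nat} {ra rb : Nat}
    (hv : pvValid n p) (hra : pvStp p ra = ra) (hrb : pvStp p rb = rb)
    (hne : ra ≠ rb) (hrbn : rb < n) :
    ∀ y r, pvReaches p y r →
      pvReaches (p.set rb ra) y (if r = rb then ra else r) := by
  have hrblen : rb < p.length := by rw [hv.1]; exact hrbn
  have hstp : ∀ y, pvStp (p.set rb ra) y = if y = rb then ra else pvStp p y :=
    fun y => pvStp_set hrblen ra y
  have hfixra : pvStp (p.set rb ra) ra = ra := by
    rw [hstp, if_neg hne]; exact hra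
  intro y r h
  obtain ⟨k, hk, hf⟩ := h
  induction k generalizing y with
  | zero =>
    simp only [Function.iterate_zero_apply] at hk
    subst hk
    by_cases hyr : y = rb
    · rw [if_pos hyr]
      exact pvReaches_step (by rw [hstp, if_pos hyr]) ⟨0, rfl, hfixra⟩
    · rw [if_neg hyr]
      exact ⟨0, rfl, by rw [hstp, if_neg hyr]; exact hf⟩
  | succ k ih =>
    rw [Function.iterate_succ_apply] at hk
    by_cases hyr : y = rb
    · rw [hyr, hrb] at hk
      have hr2 : r = rb := by rw [← hk, Function.iterate_fixed hrb]
      rw [if_pos hr2]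
      exact pvReaches_step (by rw [hstp, if_pos hyr]) ⟨0, rfl, hfixra⟩
    · exact pvReaches_step (by rw [hstp, if_neg hyr]) (ih _ hk)

def pvKer (n : Nat) (p : List Nat) (lab : List Nat) : Prop :=
  ∀ x, x < n → ∀ y, y < n → (pvSameRoot p x y ↔ lab.getD x 0 = lab.getD y 0)

def pvInv (n : Nat) (p : List Nat) (lab : List Nat) : Prop :=
  pvValid n p ∧ pvGrounded n p ∧ lab.length = n ∧ pvKer n p lab

theorem pvUnionA_inv {n : Nat} {p lab : List Nat} {sz : List Int} {i j : Nat}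
    (hI : pvInv n p lab) (hi : i < n) (hj : j < n) :
    pvInv n (pvUnionA (p, sz) i j).1 (pvLabStep lab i j) := by
  obtain ⟨hv, hg, hlen, hker⟩ := hI
  obtain ⟨ra, hrai⟩ := hg i hi
  obtain ⟨rb, hrbj⟩ := hg j hj
  obtain ⟨hf1r, hf1v, hf1e⟩ := pvFindA_spec hv hi hrai
  have hrbj1 : pvReaches (pvFindA p i).1 j rb := (hf1e j rb).mpr hrbj
  obtain ⟨hf2r, hf2v, hf2e⟩ := pvFindA_spec hf1v hj hrbj1
  have hE : ∀ y s, pvReaches (pvFindA (pvFindA p i).1 j).1 y s ↔ pvReaches p y s :=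
    fun y s => (hf2e y s).trans (hf1e y s)
  have hg2 : pvGrounded n (pvFindA (pvFindA p i).1 j).1 :=
    fun y hy => (hg y hy).imp (fun r hr => (hE y r).mpr hr)
  -- the label images of i and j
  have hlij : pvSameRoot p i j ↔ lab.getD i 0 = lab.getD j 0 := hker i hi j hj
  have hsame_iff : pvSameRoot p i j ↔ ra = rb := pvSameRoot_iff hrai hrbj
  unfold pvUnionA pvLabStep
  simp only [hf1r, hf2r]
  set p2 := (pvFindA (pvFindA p i).1 j).1 with hp2
  by_cases heq : rb = ra
  · -- roots equal: union is a no-op on the partition, labels are equal too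
    have hlab_eq : lab.getD i 0 = lab.getD j 0 := hlij.mp (hsame_iff.mpr heq.symm)
    rw [if_pos heq, if_pos hlab_eq]
    refine ⟨hf2v, hg2, hlen, ?_⟩
    intro x hx y hy
    rw [← hker x hx y hy]
    constructor
    · rintro ⟨r, h1, h2⟩; exact ⟨r, (hE x r).mp h1, (hE y r).mp h2⟩
    · rintro ⟨r, h1, h2⟩; exact ⟨r, (hE x r).mpr h1, (hE y r).mpr h2⟩
  · rw [if_neg heq]
    have hab : ra ≠ rb := fun h => heq h.symm
    have hlne : lab.getD i 0 ≠ lab.getD j 0 := fun h => hab (hsame_iff.mp (hlij.mpr h))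
    rw [if_neg hlne]
    -- roots in p2
    have hrai2 : pvReaches p2 i ra := (hE i ra).mpr hrai
    have hrbj2 : pvReaches p2 j rb := (hE j rb).mpr hrbj
    have hfixa : pvStp p2 ra = ra := pvReaches_fix hrai2
    have hfixb : pvStp p2 rb = rb := pvReaches_fix hrbj2
    have hran : ra < n := pvReaches_lt hv hi hrai
    have hrbn : rb < n := pvReaches_lt hv hj hrbj
    -- the merge, in either swap order
    set rr := if sz.getD ra 0 < sz.getD rb 0 then (rb, ra) else (ra, rb) with hrr
    have hrrne : rr.1 ≠ rr.2 := by rw [hrr]; split <;> simp [hab, Ne.symm hab]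
    have hrr1fix : pvStp p2 rr.1 = rr.1 := by rw [hrr]; split <;> assumption
    have hrr2fix : pvStp p2 rr.2 = rr.2 := by rw [hrr]; split <;> assumption
    have hrr2n : rr.2 < n := by rw [hrr]; split <;> assumption
    have hrr1n : rr.1 < n := by rw [hrr]; split <;> assumption
    have hmer := pvMerge_reaches hf2v hrr1fix hrr2fix hrrne hrr2n
    set p3 := p2.set rr.2 rr.1 with hp3
    -- membership in the merged pair is membership in {ra, rb}
    have hpair : ∀ u, (u = rr.1 ∨ u = rr.2) ↔ (u = ra ∨ u = rb) := by
      intro u; rw [hrr]; split <;> constructor <;> rintro (h | h) <;> simp [h]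
    constructor
    · -- validity of p3
      constructor
      · rw [hp3, List.length_set, hf2v.1]
      · intro y hy
        have := pvStp_set (a := rr.2) (p := p2) (by rw [hf2v.1]; exact hrr2n) rr.1 y
        rw [hp3, this]
        split
        · exact hrr1n
        · exact hf2v.2 y hy
    refine ⟨?_, by simpa using hlen, ?_⟩
    · -- groundedness of p3
      intro y hy
      obtain ⟨r, hr⟩ := hg2 y hy
      exact ⟨_, hmer y r hr⟩
    · -- the kernels still agree
      intro x hx y hy
      obtain ⟨rx, hrx⟩ := hg x hx
      obtain ⟨ry, hry⟩ := hg y hy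
      have hrx2 : pvReaches p2 x rx := (hE x rx).mpr hrx
      have hry2 : pvReaches p2 y ry := (hE y ry).mpr hry
      have hmx := hmer x rx hrx2
      have hmy := hmer y ry hry2
      rw [pvSameRoot_iff hmx hmy, pvCollapse hrrne]
      -- label side
      have hlx : (lab.map (fun l => if l = lab.getD j 0 then lab.getD i 0 else l)).getD x 0
          = (fun l => if l = lab.getD j 0 then lab.getD i 0 else l) (lab.getD x 0) :=
        pvGetD_map _ lab (by rw [hlen]; exact hx)
      have hly : (lab.map (fun l => if l = lab.getD j 0 then lab.getD i 0 else l)).getD y 0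
          = (fun l => if l = lab.getD j 0 then lab.getD i 0 else l) (lab.getD y 0) :=
        pvGetD_map _ lab (by rw [hlen]; exact hy)
      rw [hlx, hly]
      simp only []
      rw [pvCollapse hlne]
      -- translate root equalities to label equalities
      have hroot_lab : ∀ z rz, z < n → pvReaches p z rz →
          ((rz = ra ↔ lab.getD z 0 = lab.getD i 0) ∧ (rz = rb ↔ lab.getD z 0 = lab.getD j 0)) := by
        intro z rz hz hrz
        constructor
        · rw [← pvSameRoot_iff hrz hrai, hker z hz i hi]
        · rw [← pvSameRoot_iff hrz hrbj, hker z hz j hj]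
      obtain ⟨hxa, hxb⟩ := hroot_lab x rx hx hrx
      obtain ⟨hya, hyb⟩ := hroot_lab y ry hy hry
      have hxy : rx = ry ↔ lab.getD x 0 = lab.getD y 0 := by
        rw [← pvSameRoot_iff hrx hry, hker x hx y hy]
      rw [hpair rx, hpair ry, hxy, hxa, hxb, hya, hyb]

theorem pvFold_inv {n : Nat} (es : List (Int × Nat × Nat))
    (hes : ∀ e ∈ es, e.2.1 < n ∧ e.2.2 < n) :
    ∀ (p lab : List Nat) (sz : List Int), pvInv n p lab →
      pvInv n (es.foldl (fun st e => pvUnionA st e.2.1 e.2.2) (p, sz)).1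
        (es.foldl (fun lab e => pvLabStep lab e.2.1 e.2.2) lab) := by
  induction es with
  | nil => intro p lab sz hI; exact hI
  | cons e es ih =>
    intro p lab sz hI
    simp only [List.foldl_cons]
    have he := hes e (by simp)
    have hI' := pvUnionA_inv (sz := sz) hI he.1 he.2
    have := ih (fun e' he' => hes e' (by simp [he'])) (pvUnionA (p, sz) e.2.1 e.2.2).1
      (pvLabStep lab e.2.1 e.2.2) (pvUnionA (p, sz) e.2.1 e.2.2).2 hI'
    simpa using this

def pvRootF (p : List Nat) (x : Nat) : Nat := (pvFindA p x).2

theorem pvCountA_eq {n : Nat} {pstar : List Nat}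
    (hv : pvValid n pstar) (hg : pvGrounded n pstar) :
    ∀ (l : List Nat), (∀ i ∈ l, i < n) →
      ∀ (p : List Nat) (d : PySem.Dict Nat Int),
        pvValid n p → (∀ y s, pvReaches p y s ↔ pvReaches pstar y s) →
        (l.foldl (fun pd i =>
            let fr := pvFindA pd.1 i
            (fr.1, pd.2.insert fr.2 (pd.2.getD fr.2 0 + 1))) (p, d)).2 =
          l.foldl (fun d i => d.insert (pvRootF pstar i) (d.getD (pvRootF pstar i) 0 + 1)) d := by
  intro l
  induction l with
  | nil => intro _ p d _ _; rfl
  | cons i l ih =>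
    intro hmem p d hvp hEq
    have hi : i < n := hmem i (by simp)
    obtain ⟨r, hrstar⟩ := hg i hi
    have hrp : pvReaches p i r := (hEq i r).mpr hrstar
    obtain ⟨hr1, hr2, hr3⟩ := pvFindA_spec hvp hi hrp
    obtain ⟨hs1, _, _⟩ := pvFindA_spec hv hi hrstar
    have hroot : (pvFindA p i).2 = pvRootF pstar i := by rw [hr1, pvRootF, hs1]
    simp only [List.foldl_cons, hroot]
    exact ih (fun x hx => hmem x (by simp [hx])) (pvFindA p i).1 _ hr2
      (fun y s => (hr3 y s).trans (hEq y s))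

def pvAlign (zs : List (Nat × Nat)) (d1 d2 : PySem.Dict Nat Int) : Prop :=
  List.Forall₂ (fun u v => (u.1, v.1) ∈ zs ∧ u.2 = v.2) d1.items d2.items

theorem pvAlign_lookup {zs : List (Nat × Nat)}
    (hk : ∀ u ∈ zs, ∀ v ∈ zs, u.1 = v.1 ↔ u.2 = v.2)
    {d1 d2 : PySem.Dict Nat Int} (h : pvAlign zs d1 d2) {a b : Nat} (hab : (a, b) ∈ zs) :
    d1.contains a = d2.contains b ∧ d1.getD a 0 = d2.getD b 0 := by
  rcases d1 with ⟨l1⟩; rcases d2 with ⟨l2⟩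
  unfold pvAlign at h
  simp only [PySem.Dict.items] at h
  unfold PySem.Dict.contains PySem.Dict.getD PySem.Dict.get?
  induction h with
  | nil => exact ⟨rfl, rfl⟩
  | cons huv hrest ih =>
    obtain ⟨hmem, hsnd⟩ := huv
    rename_i u v l1 l2
    have hiff : u.1 = a ↔ v.1 = b := by simpa using hk _ hmem _ hab
    by_cases h1 : u.1 = a
    · have h2 : v.1 = b := hiff.mp h1
      constructor
      · simp [List.any_cons, h1, h2]
      · simp [h1, h2, hsnd]
    · have h2 : v.1 ≠ b := fun hx => h1 (hiff.mpr hx)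
      have e1 : (u.1 == a) = false := by simp [h1]
      have e2 : (v.1 == b) = false := by simp [h2]
      constructor
      · simp [List.any_cons, e1, e2, ih.1]
      · simpa [List.find?_cons, e1, e2] using ih.2

theorem pvForall₂_app {α : Type} {R : α → α → Prop} :
    ∀ {l1 l2 u1 u2 : List α}, List.Forall₂ R l1 l2 → List.Forall₂ R u1 u2 →
      List.Forall₂ R (l1 ++ u1) (l2 ++ u2) := by
  intro l1 l2 u1 u2 h hu
  induction h with
  | nil => exact hu
  | cons huv _ ih => exact List.Forall₂.cons huv ih

theorem pvAlign_insert {zs : List (Nat × Nat)}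
    (hk : ∀ u ∈ zs, ∀ v ∈ zs, u.1 = v.1 ↔ u.2 = v.2)
    {d1 d2 : PySem.Dict Nat Int} (h : pvAlign zs d1 d2) {a b : Nat} (hab : (a, b) ∈ zs)
    (v : Int) : pvAlign zs (d1.insert a v) (d2.insert b v) := by
  have hc := (pvAlign_lookup hk h hab).1
  unfold pvAlign at h ⊢
  rw [PySem.Dict.items_insert, PySem.Dict.items_insert, ← hc]
  rcases d1 with ⟨l1⟩; rcases d2 with ⟨l2⟩
  simp only [PySem.Dict.items] at h ⊢
  by_cases hcc : (PySem.Dict.mk l1).contains a = true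
  · rw [if_pos hcc, if_pos hcc]
    clear hc hcc
    induction h with
    | nil => exact List.Forall₂.nil
    | cons huv hrest ih =>
      obtain ⟨hmem, hsnd⟩ := huv
      rename_i u w l1 l2
      have hiff : u.1 = a ↔ w.1 = b := by simpa using hk _ hmem _ hab
      refine List.Forall₂.cons ?_ ih
      by_cases h1 : u.1 = a
      · have h2 : w.1 = b := hiff.mp h1
        simp [h1, h2, hab]
      · have h2 : w.1 ≠ b := fun hx => h1 (hiff.mpr hx)
        simp [h1, h2, hmem, hsnd]
  · rw [if_neg hcc, if_neg hcc]
    exact pvForall₂_app h (List.Forall₂.cons ⟨hab, rfl⟩ List.Forall₂.nil)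

theorem pvAlign_fold {zs : List (Nat × Nat)}
    (hk : ∀ u ∈ zs, ∀ v ∈ zs, u.1 = v.1 ↔ u.2 = v.2) :
    ∀ (ws : List (Nat × Nat)), (∀ w ∈ ws, w ∈ zs) →
      ∀ d1 d2, pvAlign zs d1 d2 →
        pvAlign zs
          (ws.foldl (fun d w => d.insert w.1 (d.getD w.1 0 + 1)) d1)
          (ws.foldl (fun d w => d.insert w.2 (d.getD w.2 0 + 1)) d2) := by
  intro ws
  induction ws with
  | nil => intro _ d1 d2 h; exact h
  | cons w ws ih =>
    intro hmem d1 d2 h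
    simp only [List.foldl_cons]
    have hwz : (w.1, w.2) ∈ zs := hmem w (by simp)
    have hval := (pvAlign_lookup hk h hwz).2
    rw [hval]
    exact ih (fun w' hw' => hmem w' (by simp [hw'])) _ _ (pvAlign_insert hk h hwz _)

theorem pvForall₂_snd {R : Nat × Int → Nat × Int → Prop}
    (hR : ∀ u v, R u v → u.2 = v.2) :
    ∀ {l1 l2 : List (Nat × Int)}, List.Forall₂ R l1 l2 →
      l1.map (fun x => x.2) = l2.map (fun x => x.2) := by
  intro l1 l2 h
  induction h with
  | nil => rfl
  | cons huv _ ih => simp [hR _ _ huv, ih]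

theorem pvValues_eq_of_kernel (xs ys : List Nat) (hlen : xs.length = ys.length)
    (hker : ∀ a, a < xs.length → ∀ b, b < xs.length →
      (xs.getD a 0 = xs.getD b 0 ↔ ys.getD a 0 = ys.getD b 0)) :
    (xs.foldl (fun d l => d.insert l (d.getD l (0 : Int) + 1)) PySem.Dict.empty).values =
    (ys.foldl (fun d l => d.insert l (d.getD l (0 : Int) + 1)) PySem.Dict.empty).values := by
  set zs := xs.zip ys with hzs
  have hmemz : ∀ u ∈ zs, ∃ i, ∃ h : i < xs.length, u = (xs[i], ys[i]) := by
    intro u hu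
    rw [hzs] at hu
    rw [List.mem_iff_getElem] at hu
    obtain ⟨i, hilt, hgi⟩ := hu
    have hil : i < xs.length := by
      rw [List.length_zip] at hilt; omega
    refine ⟨i, hil, ?_⟩
    rw [← hgi, List.getElem_zip]
  have hk : ∀ u ∈ zs, ∀ v ∈ zs, u.1 = v.1 ↔ u.2 = v.2 := by
    intro u hu v hv
    obtain ⟨i, hi, rfl⟩ := hmemz u hu
    obtain ⟨j, hj, rfl⟩ := hmemz v hv
    have := hker i hi j hj
    rw [List.getD_eq_getElem xs 0 hi, List.getD_eq_getElem xs 0 hj,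
        List.getD_eq_getElem ys 0 (by omega), List.getD_eq_getElem ys 0 (by omega)] at this
    simpa using this
  have halign := pvAlign_fold hk zs (fun w hw => hw) PySem.Dict.empty PySem.Dict.empty
    List.Forall₂.nil
  have hxs : xs = zs.map Prod.fst := by
    rw [hzs, List.map_fst_zip (show xs.length ≤ ys.length by omega)]
  have hys : ys = zs.map Prod.snd := by
    rw [hzs, List.map_snd_zip (show ys.length ≤ xs.length by omega)]
  have e1 : xs.foldl (fun d l => d.insert l (d.getD l (0 : Int) + 1)) PySem.Dict.empty
      = zs.foldl (fun d w => d.insert w.1 (d.getD w.1 0 + 1)) PySem.Dict.empty := by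
    conv_lhs => rw [hxs]
    rw [List.foldl_map]
  have e2 : ys.foldl (fun d l => d.insert l (d.getD l (0 : Int) + 1)) PySem.Dict.empty
      = zs.foldl (fun d w => d.insert w.2 (d.getD w.2 0 + 1)) PySem.Dict.empty := by
    conv_lhs => rw [hys]
    rw [List.foldl_map]
  rw [e1, e2]
  unfold PySem.Dict.values
  exact pvForall₂_snd (fun u v h => h.2) halign

theorem pvRangeFilter {α : Type} (n i : Nat) (f : Nat → α) :
    (List.range n).flatMap (fun j => if i < j then [f j] else []) =
      (List.range' (i + 1) (n - (i + 1))).map f := by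
  induction n with
  | zero => simp
  | succ n ih =>
    rw [List.range_succ, List.flatMap_append, ih]
    by_cases h : i < n
    · have hlen : n + 1 - (i + 1) = (n - (i + 1)) + 1 := by omega
      rw [hlen, List.range'_concat]
      have h2 : i + 1 + 1 * (n - (i + 1)) = n := by omega
      rw [h2]
      simp [h]
    · have h1 : n + 1 - (i + 1) = 0 := by omega
      have h2 : n - (i + 1) = 0 := by omega
      simp [h1, h2, h]

theorem pvZipIdx_eq (pts : List (Int × Int × Int)) :
    pts.zipIdx = (List.range pts.length).map (fun i => (pts.getD i (0, 0, 0), i)) := by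
  apply List.ext_getElem (by simp)
  intro i h1 h2
  simp only [List.getElem_map, List.getElem_range, List.getElem_zipIdx]
  rw [List.getD_eq_getElem pts (0, 0, 0) (by simpa using h1)]
  simp

theorem pvEdgesB_eq (pts : List (Int × Int × Int)) : pvEdgesB pts = pvEdges pts := by
  unfold pvEdgesB pvEdges
  rw [pvZipIdx_eq, List.flatMap_map]
  refine List.flatMap_congr ?_
  intro i hi
  rw [List.flatMap_map]
  have := pvRangeFilter pts.length i (fun j =>
      let p := pts.getD i (0, 0, 0)
      let q := pts.getD j (0, 0, 0)
      ((p.1 - q.1) ^ 2 + (p.2.1 - q.2.1) ^ 2 + (p.2.2 - q.2.2) ^ 2, i, j))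
  simp only at this ⊢
  rw [this]
  apply List.map_congr_left
  intro j hj
  ring_nf

theorem pvEdges_valid (pts : List (Int × Int × Int)) {k : Int} :
    ∀ e ∈ pvNSmallest k (pvEdges pts), e.2.1 < pts.length ∧ e.2.2 < pts.length := by
  intro e he
  unfold pvNSmallest at he
  split at he
  · simp at he
  · have h1 : e ∈ PySem.List.sorted (pvEdges pts) (fun e => e.1) := List.mem_of_mem_take he
    have h2 : e ∈ pvEdges pts := (PySem.List.mem_sorted _ _ _ _).mp h1
    unfold pvEdges at h2
    rw [List.mem_flatMap] at h2
    obtain ⟨i, hi, hin⟩ := h2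
    rw [List.mem_range] at hi
    rw [List.mem_map] at hin
    obtain ⟨j, hj, hje⟩ := hin
    rw [List.mem_range'] at hj
    obtain ⟨m, hm, hjm⟩ := hj
    subst hje
    simp only []
    omega

theorem pvCore_eq (pts : List (Int × Int × Int)) (num_pairs : Int) :
    pvPart1Core pts num_pairs = pvPart1AltCore pts num_pairs := by
  unfold pvPart1Core pvPart1AltCore
  dsimp only
  rw [pvEdgesB_eq]
  set n := pts.length with hn
  set es := pvNSmallest num_pairs (pvEdges pts) with hes
  have hval := pvEdges_valid pts (k := num_pairs)
  rw [← hes] at hval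
  -- the initial state is invariant
  have hstp0 : ∀ x, x < n → pvStp (List.range n) x = x := by
    intro x hx
    unfold pvStp
    rw [List.getD_eq_getElem _ 0 (by simpa using hx), List.getElem_range]
  have hI0 : pvInv n (List.range n) (List.range n) := by
    refine ⟨⟨by simp, fun x hx => by rw [hstp0 x hx]; exact hx⟩, ?_, by simp, ?_⟩
    · exact fun x hx => ⟨x, 0, rfl, hstp0 x hx⟩
    · intro x hx y hy
      have hrx : pvReaches (List.range n) x x := ⟨0, rfl, hstp0 x hx⟩
      have hry : pvReaches (List.range n) y y := ⟨0, rfl, hstp0 y hy⟩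
      rw [pvSameRoot_iff hrx hry]
      rw [List.getD_eq_getElem _ 0 (by simpa using hx), List.getD_eq_getElem _ 0 (by simpa using hy)]
      simp
  have hIF := pvFold_inv es hval (List.range n) (List.range n) (List.replicate n 1) hI0
  set pF := (es.foldl (fun st e => pvUnionA st e.2.1 e.2.2) (List.range n, List.replicate n 1)).1 with hpF
  set labF := es.foldl (fun lab e => pvLabStep lab e.2.1 e.2.2) (List.range n) with hlabF
  obtain ⟨hvF, hgF, hlenF, hkerF⟩ := hIF
  -- A's counting loop is a counter over the roots list
  have hcount := pvCountA_eq hvF hgF (List.range n) (fun i hi => List.mem_range.mp hi)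
    pF PySem.Dict.empty hvF (fun y s => Iff.rfl)
  unfold pvCountA
  rw [hcount]
  -- rewrite the range-fold as a fold over the roots list
  have hfold : (List.range n).foldl
      (fun d i => d.insert (pvRootF pF i) (d.getD (pvRootF pF i) 0 + 1)) PySem.Dict.empty =
      ((List.range n).map (pvRootF pF)).foldl
        (fun d l => d.insert l (d.getD l (0 : Int) + 1)) PySem.Dict.empty := by
    rw [List.foldl_map]
  rw [hfold]
  -- the two counting folds have equal values lists
  have hvals := pvValues_eq_of_kernel ((List.range n).map (pvRootF pF)) labF
    (by simp [hlenF, hn]) ?_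
  · rw [hvals]
  · intro a ha b hb
    simp only [List.length_map, List.length_range] at ha hb
    have hga : (((List.range n).map (pvRootF pF)).getD a 0) = pvRootF pF a := by
      have := pvGetD_map (pvRootF pF) (List.range n) (i := a) (by simpa using ha)
      rw [this, List.getD_eq_getElem _ 0 (by simpa using ha), List.getElem_range]
    have hgb : (((List.range n).map (pvRootF pF)).getD b 0) = pvRootF pF b := by
      have := pvGetD_map (pvRootF pF) (List.range n) (i := b) (by simpa using hb)
      rw [this, List.getD_eq_getElem _ 0 (by simpa using hb), List.getElem_range]
    rw [hga, hgb]
    -- pvRootF pF a = pvRootF pF b ↔ same root ↔ equal labels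
    obtain ⟨ra, hra⟩ := hgF a ha
    obtain ⟨rb, hrb⟩ := hgF b hb
    have ha1 : pvRootF pF a = ra := (pvFindA_spec hvF ha hra).1
    have hb1 : pvRootF pF b = rb := (pvFindA_spec hvF hb hrb).1
    rw [ha1, hb1, ← pvSameRoot_iff hra hrb, hkerF a ha b hb]

-- ===== VERDICT (by name: the statement is the Claim_ definition above) =====
theorem part1_spec : Claim_equal_part1 := by
  intro text num_pairs _ _
  unfold Spec_part1 part1 part1_alt
  cases pvParse? text with
  | none => rfl
  | some pts => exact pvCore_eq pts num_pairs
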